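-- pv_equiv track=rewrite | github.com/MultSec/Modules | Payload/Obfuscation/MACFuscation/scripts/prep.py | create_macs_string
-- ===== SOURCE A (Python) =====
-- def create_macs_string(macs):
--     macs_str = ""
--     # Create the string with the MAC addresses
--     for i, mac in enumerate(macs):
--         macs_str += f"\"{mac}\", "
--         if (i+1) % 3 == 0:
--             # If its the last MAC address, don't add a new line
--             if i != len(macs) - 1:
--                 macs_str += "\n\t"
--
--     # Remove the last comma
--     macs_str = macs_str[:-2]
--
--     return macs_str
-- ===== SOURCE B (Python) =====
-- def create_macs_string(macs):
--     chunks = [macs[i:i+3] for i in range(0, len(macs), 3)]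
--     return ", \n\t".join(", ".join(f'"{m}"' for m in chunk) for chunk in chunks)
-- ===== Notes on version B (the rewrite author's own statement) =====
-- stated objective: idiomatic
-- what changed: Replaces the enumerate loop with its modulo test and final [:-2] strip by chunking the list into threes and joining with ', ' inside a chunk and ', \n\t' between chunks, so no trailing separator is ever produced.
import Mathlib
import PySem

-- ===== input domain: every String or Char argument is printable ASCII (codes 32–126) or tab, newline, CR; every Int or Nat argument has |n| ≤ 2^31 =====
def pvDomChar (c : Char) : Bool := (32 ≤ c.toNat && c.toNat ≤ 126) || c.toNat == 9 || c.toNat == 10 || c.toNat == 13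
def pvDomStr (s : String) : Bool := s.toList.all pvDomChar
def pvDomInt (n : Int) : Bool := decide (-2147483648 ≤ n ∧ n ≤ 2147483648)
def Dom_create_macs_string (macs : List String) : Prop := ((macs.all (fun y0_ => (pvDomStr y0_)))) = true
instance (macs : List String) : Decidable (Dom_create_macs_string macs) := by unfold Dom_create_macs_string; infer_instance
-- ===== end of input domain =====

-- B replaces A's enumerate-and-strip loop by chunking into threes and joining with ", " / ", \n\t" (idiomatic; same cost).

-- ===== PORT A =====
-- A: accumulate '"mac", ' per element, add "\n\t" after every third (except the last), then drop the final 2 chars.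
def create_macs_string (macs : List String) : String :=
  String.ofList (PySem.List.slice
    ((PySem.List.enumerate macs).foldl (fun acc p =>
      let acc := acc ++ ('"' :: p.2.toList ++ ['"', ',', ' '])
      if PySem.Int.mod (p.1 + 1) 3 = 0 then
        if p.1 ≠ (macs.length : Int) - 1 then acc ++ ['\n', '\t'] else acc
      else acc) [])
    none (some (-2)))

-- ===== PORT B =====
-- B: chunks of three via a range-step slice, ", ".join inside a chunk, ", \n\t".join between chunks.
def create_macs_string_alt (macs : List String) : String :=
  String.ofList (PySem.Chars.join [',', ' ', '\n', '\t']
    (((PySem.List.pyRange 0 (macs.length : Int) 3).map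
        (fun i => PySem.List.slice macs (some i) (some (i + 3)))).map
      (fun c => PySem.Chars.join [',', ' ']
        (c.map (fun m => '"' :: m.toList ++ ['"'])))))

-- ===== PRECONDITION & SPEC =====
def Spec_create_macs_string (macs : List String) (out : String) : Prop := out = create_macs_string_alt macs
instance (macs : List String) (out : String) : Decidable (Spec_create_macs_string macs out) := by unfold Spec_create_macs_string; infer_instance

-- ===== CLAIM (what is proved, stated in full; the proofs are below) =====
def Claim_equal_create_macs_string : Prop := ∀ (macs : List String), Dom_create_macs_string macs → Spec_create_macs_string macs (create_macs_string macs)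

-- ===== LEMMAS AND PROOFS =====

-- quoted mac, and the per-element piece A appends (quoted mac, comma-space, optional line break)
def pvQuote (m : String) : List Char := '"' :: m.toList ++ ['"']

def pvPiece (n : Int) (p : Int × String) : List Char :=
  pvQuote p.2 ++ [',', ' '] ++
    (if PySem.Int.mod (p.1 + 1) 3 = 0 then
       (if p.1 ≠ n - 1 then ['\n', '\t'] else []) else [])

-- consecutive chunks of three
def pvChunks3 {α : Type} : List α → List (List α)
  | [] => []
  | x :: xs => ((x :: xs).take 3) :: pvChunks3 (xs.drop 2)
  termination_by l => l.length
  decreasing_by simp [List.length_drop]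

def pvLine (c : List String) : List Char :=
  PySem.Chars.join [',', ' '] (c.map (fun m => '"' :: m.toList ++ ['"']))

lemma pvChunks3_nil {α : Type} : pvChunks3 ([] : List α) = [] := by
  rw [pvChunks3.eq_def]

lemma pvChunks3_cons {α : Type} (x : α) (xs : List α) :
    pvChunks3 (x :: xs) = ((x :: xs).take 3) :: pvChunks3 (xs.drop 2) := by
  rw [pvChunks3.eq_def]

lemma pvChunks3_cons_ne_nil {α : Type} (s : List α) (h : s ≠ []) :
    pvChunks3 s = s.take 3 :: pvChunks3 (s.drop 3) := by
  cases s with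
  | nil => exact absurd rfl h
  | cons x xs => rw [pvChunks3_cons]; simp

lemma pvQuote_toList (m : String) :
    '"' :: m.toList ++ ['"', ',', ' '] = pvQuote m ++ [',', ' '] := by
  simp [pvQuote]

-- pyRange with step 3: structural cons / nil
lemma pvPyRange3_nil (a b : Int) (h : b ≤ a) : PySem.List.pyRange a b 3 = [] := by
  rw [PySem.List.pyRange_of_pos a b (by norm_num)]
  simp [not_lt.mpr h]

lemma pvPyRange3_cons (a b : Int) (h : a < b) :
    PySem.List.pyRange a b 3 = a :: PySem.List.pyRange (a + 3) b 3 := by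
  rw [PySem.List.pyRange_of_pos a b (by norm_num),
      PySem.List.pyRange_of_pos (a + 3) b (by norm_num)]
  have h1 : ((b - a + 3 - 1) / 3).toNat = ((b - (a + 3) + 3 - 1) / 3).toNat + 1 := by omega
  by_cases h2 : a + 3 < b
  · simp only [if_pos h, if_pos h2, h1, List.range_succ_eq_map]
    simp [Function.comp_def, mul_add]
    ring_nf
    intros; trivial
  · have h3 : ((b - a + 3 - 1) / 3).toNat = 1 := by omega
    simp [if_pos h, if_neg h2, h3, List.range_succ]

-- B's chunk comprehension computes pvChunks3 of the remaining suffix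
lemma pvChunkB (macs : List String) :
    ∀ (r k : Nat), macs.length - k ≤ r →
      (PySem.List.pyRange (k : Int) (macs.length : Int) 3).map
        (fun i => PySem.List.slice macs (some i) (some (i + 3)))
      = pvChunks3 (macs.drop k) := by
  intro r
  induction r with
  | zero =>
      intro k hk
      have h : macs.length ≤ k := by omega
      rw [pvPyRange3_nil _ _ (by exact_mod_cast h)]
      rw [List.drop_eq_nil_of_le h, pvChunks3_nil, List.map_nil]
  | succ r ih =>
      intro k hk
      by_cases h : macs.length ≤ k
      · rw [pvPyRange3_nil _ _ (by exact_mod_cast h)]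
        rw [List.drop_eq_nil_of_le h, pvChunks3_nil, List.map_nil]
      · have hlt : (k : Int) < (macs.length : Int) := by exact_mod_cast Nat.lt_of_not_le h
        rw [pvPyRange3_cons _ _ hlt, List.map_cons]
        have hcast : (k : Int) + 3 = ((k + 3 : Nat) : Int) := by push_cast; ring
        have hsl : PySem.List.slice macs (some (k : Int)) (some ((k : Int) + 3))
            = (macs.drop k).take 3 := by
          rw [show (k : Int) + 3 = ((k : Nat) : Int) + ((3 : Nat) : Int) by push_cast; ring]
          exact PySem.List.slice_natCast_add macs k 3
        rw [hsl, hcast, ih (k + 3) (by omega)]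
        rw [pvChunks3_cons_ne_nil (macs.drop k) (by
          intro hnil
          have := List.drop_eq_nil_iff.mp hnil
          omega)]
        simp [List.drop_drop]

-- A's flatMap of pieces over the suffix starting at a multiple of three
lemma pvMainA (n : Int) :
    ∀ (r : Nat) (s : List String) (k : Nat), s.length ≤ r → k % 3 = 0 →
      (k : Int) + s.length = n → s ≠ [] →
      (PySem.List.enumerate s (k : Int)).flatMap (pvPiece n)
        = PySem.Chars.join [',', ' ', '\n', '\t'] ((pvChunks3 s).map pvLine) ++ [',', ' '] := by
  intro r
  induction r with
  | zero => intro s k h _ _ hne; cases s with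
      | nil => exact absurd rfl hne
      | cons a t => simp at h
  | succ r ih =>
      intro s k hr hk hn hne
      have hd1 : ¬ ((3 : Int) ∣ ((k : Int) + 1)) := by omega
      have hd2 : ¬ ((3 : Int) ∣ ((k : Int) + 1 + 1)) := by omega
      have hd3 : (3 : Int) ∣ ((k : Int) + 1 + 1 + 1) := by omega
      match s with
      | [a] =>
          simp only [List.length_cons, List.length_nil] at hn
          have hl : (k : Int) = n - 1 := by push_cast at hn; omega
          simp [PySem.List.enumerate_cons, PySem.List.enumerate_nil, pvPiece, pvLine,
                pvQuote, pvChunks3_cons, pvChunks3_nil, PySem.Chars.join_singleton, hl]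
      | [a, b] =>
          simp [PySem.List.enumerate_cons, PySem.List.enumerate_nil, pvPiece, pvLine,
                pvQuote, pvChunks3_cons, pvChunks3_nil, PySem.Chars.join_singleton,
                PySem.Chars.join_cons_cons, hd1, hd2]
      | a :: b :: c :: rest =>
          by_cases hrest : rest = []
          · subst hrest
            simp only [List.length_cons, List.length_nil] at hn
            have hl : (k : Int) + 1 + 1 = n - 1 := by push_cast at hn; omega
            have hd2' : ¬ ((3 : Int) ∣ (n - 1)) := by rw [← hl]; exact hd2
            simp [PySem.List.enumerate_cons, PySem.List.enumerate_nil, pvPiece, pvLine,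
                  pvQuote, pvChunks3_cons, pvChunks3_nil, PySem.Chars.join_singleton,
                  PySem.Chars.join_cons_cons, hd1, hd2', hl]
          · have hrlen : rest.length ≠ 0 := by
              intro h0; exact hrest (List.eq_nil_of_length_eq_zero h0)
            simp only [List.length_cons] at hn hr
            have hlast : (k : Int) + 1 + 1 ≠ n - 1 := by push_cast at hn; omega
            have hkc : (k : Int) + 1 + 1 + 1 = ((k + 3 : Nat) : Int) := by push_cast; ring
            have hih := ih rest (k + 3) (by omega) (by omega)
              (by push_cast at hn ⊢; omega) hrest
            rw [pvChunks3_cons_ne_nil (a :: b :: c :: rest) (by simp)]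
            have hch : pvChunks3 rest ≠ [] := by
              cases rest with
              | nil => exact absurd rfl hrest
              | cons x xs => rw [pvChunks3_cons]; simp
            obtain ⟨hd, tl, hht⟩ := List.exists_cons_of_ne_nil hch
            simp only [PySem.List.enumerate_cons, List.flatMap_cons, hkc]
            rw [hih]
            simp only [List.drop_succ_cons, List.drop_zero, List.take_succ_cons,
              List.take_zero, List.map_cons, hht, PySem.Chars.join_cons_cons]
            simp [pvPiece, pvLine, hd1, hd2, hd3, hlast, pvQuote,
              PySem.Chars.join_singleton, PySem.Chars.join_cons_cons]

-- A's loop body is an append of a piece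
lemma pvStep (macs : List String) (acc : List Char) (p : Int × String) :
    (let acc2 := acc ++ ('"' :: p.2.toList ++ ['"', ',', ' '])
     if PySem.Int.mod (p.1 + 1) 3 = 0 then
       if p.1 ≠ ((macs.length : Int)) - 1 then acc2 ++ ['\n', '\t'] else acc2
     else acc2)
    = acc ++ pvPiece (macs.length : Int) p := by
  simp only [pvPiece, pvQuote_toList]
  split_ifs <;> simp

theorem pv_main (macs : List String) :
    create_macs_string macs = create_macs_string_alt macs := by
  cases macs with
  | nil => decide
  | cons a t =>
      unfold create_macs_string create_macs_string_alt
      rw [PySem.List.foldl_congr_mem _ _ (fun acc p => acc ++ pvPiece ((a :: t).length : Int) p) _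
            (fun acc p _ => pvStep (a :: t) acc p),
          PySem.List.foldl_append_eq_flatMap]
      rw [show ((0 : Int)) = ((0 : Nat) : Int) by norm_num,
          pvMainA ((a :: t).length : Int) (a :: t).length (a :: t) 0 (le_refl _)
            (by omega) (by push_cast; ring) (by simp)]
      rw [pvChunkB (a :: t) (a :: t).length 0 (by omega)]
      rw [List.nil_append, PySem.List.slice_to_neg_ofNat _ 2 (by norm_num)]
      rw [show (PySem.Chars.join [',', ' ', '\n', '\t'] ((pvChunks3 (a :: t)).map pvLine)
              ++ [',', ' ']).length - 2
            = (PySem.Chars.join [',', ' ', '\n', '\t'] ((pvChunks3 (a :: t)).map pvLine)).length by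
          simp [List.length_append]]
      rw [List.take_left, List.drop_zero]
      rfl

-- ===== VERDICT (by name: the statement is the Claim_ definition above) =====
theorem create_macs_string_spec : Claim_equal_create_macs_string := by
  intro macs _
  unfold Spec_create_macs_string
  exact pv_main macs
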